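-- pv_equiv track=rewrite | github.com/ioannisk/evolution | code/make_attention_dataset.py | delete_difference
-- ===== SOURCE A (Python) =====
-- def delete_difference(dic1,dic2):
--     a = set(dic1.keys())
--     b = set(dic2.keys())
--     diff =  a.symmetric_difference(b)
--     for key in diff:
--         if key in dic1:
--             del dic1[key]
--         if key in dic2:
--             del dic2[key]
--     return dic1, dic2
-- ===== SOURCE B (Python) =====
-- def delete_difference(dic1, dic2):
--     # Return-value equivalence: builds new dicts instead of mutating in place.
--     return ({k: v for k, v in dic1.items() if k in dic2},
--             {k: v for k, v in dic2.items() if k in dic1})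
-- ===== Notes on version B (the rewrite author's own statement) =====
-- stated objective: simpler
-- what changed: Drops the key-set/symmetric-difference construction and the deletion loop; B keeps each dict's entries whose key occurs in the other dict via two direct comprehensions (and builds new dicts instead of mutating in place).
import Mathlib
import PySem

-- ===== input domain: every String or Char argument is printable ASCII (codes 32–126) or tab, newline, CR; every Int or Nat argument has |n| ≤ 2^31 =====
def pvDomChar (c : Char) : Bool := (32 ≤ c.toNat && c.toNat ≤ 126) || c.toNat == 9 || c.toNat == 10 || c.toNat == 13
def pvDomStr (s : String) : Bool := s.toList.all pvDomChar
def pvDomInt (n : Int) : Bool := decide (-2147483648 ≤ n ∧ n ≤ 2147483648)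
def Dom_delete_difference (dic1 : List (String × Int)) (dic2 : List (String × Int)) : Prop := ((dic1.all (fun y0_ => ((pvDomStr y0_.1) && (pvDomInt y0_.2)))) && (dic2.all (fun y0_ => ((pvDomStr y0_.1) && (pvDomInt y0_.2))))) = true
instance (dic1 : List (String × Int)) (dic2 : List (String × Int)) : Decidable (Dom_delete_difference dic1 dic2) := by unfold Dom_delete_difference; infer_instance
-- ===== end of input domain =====

-- B keeps each dict's entries whose key occurs in the other dict via two direct filters,
-- instead of A's key-set/symmetric-difference construction followed by a deletion loop.
-- A mutates its arguments in place; the equivalence proved here is about the RETURN value only.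

-- ===== PORT A =====
-- a = set(dic1.keys()); b = set(dic2.keys()); diff = a ^ b; for key in diff: del where present
-- (the result does not depend on the set's iteration order: each deletion touches only its own key)
def delete_difference (dic1 : List (String × Int)) (dic2 : List (String × Int)) : (List (String × Int)) × (List (String × Int)) :=
  let a := PySem.Set.ofList (dic1.map Prod.fst)
  let b := PySem.Set.ofList (dic2.map Prod.fst)
  let diff := PySem.Set.symmDiff a b
  diff.foldl
    (fun (st : List (String × Int) × List (String × Int)) key =>
      let d1 := if st.1.any (fun p => p.1 == key) then st.1.filter (fun p => p.1 != key) else st.1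
      let d2 := if st.2.any (fun p => p.1 == key) then st.2.filter (fun p => p.1 != key) else st.2
      (d1, d2))
    (dic1, dic2)

-- ===== PORT B =====
def delete_difference_alt (dic1 : List (String × Int)) (dic2 : List (String × Int)) : (List (String × Int)) × (List (String × Int)) :=
  (dic1.filter (fun p => dic2.any (fun q => q.1 == p.1)),
   dic2.filter (fun p => dic1.any (fun q => q.1 == p.1)))

-- ===== PRECONDITION & SPEC =====
def Spec_delete_difference (dic1 : List (String × Int)) (dic2 : List (String × Int)) (out : (List (String × Int)) × (List (String × Int))) : Prop := out = delete_difference_alt dic1 dic2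
instance (dic1 : List (String × Int)) (dic2 : List (String × Int)) (out : (List (String × Int)) × (List (String × Int))) : Decidable (Spec_delete_difference dic1 dic2 out) := by unfold Spec_delete_difference; infer_instance

-- ===== CLAIM (what is proved, stated in full; the proofs are below) =====
def Claim_equal_delete_difference : Prop := ∀ (dic1 : List (String × Int)) (dic2 : List (String × Int)), Dom_delete_difference dic1 dic2 → Spec_delete_difference dic1 dic2 (delete_difference dic1 dic2)

-- ===== LEMMAS AND PROOFS =====

-- one deletion step ('if key in d: del d[key]') is a plain filter
lemma del_step_eq_filter (d : List (String × Int)) (k : String) :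
    (if d.any (fun p => p.1 == k) then d.filter (fun p => p.1 != k) else d)
      = d.filter (fun p => p.1 != k) := by
  split_ifs with h
  · rfl
  · symm
    refine List.filter_eq_self.mpr (fun p hp => ?_)
    simp only [bne_iff_ne, ne_eq]
    intro hk
    exact h (List.any_eq_true.mpr ⟨p, hp, by simp [hk]⟩)

-- deleting every key of ks is one filter by non-membership in ks
lemma foldl_filter_eq (ks : List String) (d : List (String × Int)) :
    ks.foldl (fun d k => d.filter (fun p => p.1 != k)) d
      = d.filter (fun p => !ks.contains p.1) := by
  induction ks generalizing d with
  | nil => simp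
  | cons k ks ih =>
    rw [List.foldl_cons, ih, List.filter_filter]
    refine List.filter_congr (fun p _ => ?_)
    by_cases hk : p.1 = k <;> by_cases hm : p.1 ∈ ks <;> simp [hk, hm]

-- for an entry of dic1, its key is outside the symmetric difference iff it occurs in dic2
lemma not_mem_symmDiff_left (dic1 dic2 : List (String × Int)) (p : String × Int) (hp : p ∈ dic1) :
    (!(PySem.Set.symmDiff (PySem.Set.ofList (dic1.map Prod.fst))
        (PySem.Set.ofList (dic2.map Prod.fst))).contains p.1)
      = dic2.any (fun q => q.1 == p.1) := by
  have hpa : p.1 ∈ PySem.Set.ofList (dic1.map Prod.fst) := by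
    rw [PySem.Set.mem_ofList]; exact List.mem_map_of_mem hp
  by_cases hb : p.1 ∈ dic2.map Prod.fst
  · have h1 : p.1 ∉ PySem.Set.symmDiff (PySem.Set.ofList (dic1.map Prod.fst))
        (PySem.Set.ofList (dic2.map Prod.fst)) := by
      rw [PySem.Set.mem_symmDiff]
      simp [PySem.Set.mem_ofList, hpa, hb]
    obtain ⟨q, hq, hq1⟩ := List.mem_map.mp hb
    have h2 : dic2.any (fun q => q.1 == p.1) = true :=
      List.any_eq_true.mpr ⟨q, hq, by simp [hq1]⟩
    simp [List.contains_eq_mem, h1, h2]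
  · have h1 : p.1 ∈ PySem.Set.symmDiff (PySem.Set.ofList (dic1.map Prod.fst))
        (PySem.Set.ofList (dic2.map Prod.fst)) := by
      rw [PySem.Set.mem_symmDiff]
      exact Or.inl ⟨hpa, by simpa [PySem.Set.mem_ofList] using hb⟩
    have h2 : dic2.any (fun q => q.1 == p.1) = false := by
      rw [List.any_eq_false]
      intro q hq
      simp only [beq_iff_eq]
      intro hq1
      exact hb (List.mem_map.mpr ⟨q, hq, hq1⟩)
    simp [List.contains_eq_mem, h1, h2]

-- symmetric statement for dic2
lemma not_mem_symmDiff_right (dic1 dic2 : List (String × Int)) (p : String × Int) (hp : p ∈ dic2) :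
    (!(PySem.Set.symmDiff (PySem.Set.ofList (dic1.map Prod.fst))
        (PySem.Set.ofList (dic2.map Prod.fst))).contains p.1)
      = dic1.any (fun q => q.1 == p.1) := by
  have hpb : p.1 ∈ PySem.Set.ofList (dic2.map Prod.fst) := by
    rw [PySem.Set.mem_ofList]; exact List.mem_map_of_mem hp
  by_cases ha : p.1 ∈ dic1.map Prod.fst
  · have h1 : p.1 ∉ PySem.Set.symmDiff (PySem.Set.ofList (dic1.map Prod.fst))
        (PySem.Set.ofList (dic2.map Prod.fst)) := by
      rw [PySem.Set.mem_symmDiff]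
      simp [PySem.Set.mem_ofList, hpb, ha]
    obtain ⟨q, hq, hq1⟩ := List.mem_map.mp ha
    have h2 : dic1.any (fun q => q.1 == p.1) = true :=
      List.any_eq_true.mpr ⟨q, hq, by simp [hq1]⟩
    simp [List.contains_eq_mem, h1, h2]
  · have h1 : p.1 ∈ PySem.Set.symmDiff (PySem.Set.ofList (dic1.map Prod.fst))
        (PySem.Set.ofList (dic2.map Prod.fst)) := by
      rw [PySem.Set.mem_symmDiff]
      exact Or.inr ⟨hpb, by simpa [PySem.Set.mem_ofList] using ha⟩
    have h2 : dic1.any (fun q => q.1 == p.1) = false := by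
      rw [List.any_eq_false]
      intro q hq
      simp only [beq_iff_eq]
      intro hq1
      exact ha (List.mem_map.mpr ⟨q, hq, hq1⟩)
    simp [List.contains_eq_mem, h1, h2]

-- ===== VERDICT (by name: the statement is the Claim_ definition above) =====
theorem delete_difference_spec : Claim_equal_delete_difference := by
  intro dic1 dic2 _
  show delete_difference dic1 dic2 = delete_difference_alt dic1 dic2
  simp only [delete_difference, delete_difference_alt]
  rw [PySem.List.foldl_prod_mk
        (f := fun (d : List (String × Int)) k => if d.any (fun p => p.1 == k) then d.filter (fun p => p.1 != k) else d)
        (g := fun (d : List (String × Int)) k => if d.any (fun p => p.1 == k) then d.filter (fun p => p.1 != k) else d)]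
  simp only [del_step_eq_filter]
  rw [foldl_filter_eq, foldl_filter_eq]
  exact Prod.ext
    (List.filter_congr (fun p hp => not_mem_symmDiff_left dic1 dic2 p hp))
    (List.filter_congr (fun p hp => not_mem_symmDiff_right dic1 dic2 p hp))
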